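-- pv_equiv track=rewrite | github.com/jakops88-hub/Nordicsecure | backend/app/services/document_service.py | _find_best_matching_line
-- ===== SOURCE A (Python) =====
-- from typing import Dict, List, Optional, Any, Tuple
--
-- def _find_best_matching_line(
--
--     text: str,
--     query_text: str
-- ) -> Tuple[int, str]:
--     """
--     Find the best matching line in text for a query.
--
--     Args:
--         text: The document text to search in
--         query_text: The query text to search for
--
--     Returns:
--         Tuple of (line_number, matched_line_text)
--         Returns (1, first_line) if no good match found
--     """
--     lines = text.split('\n')
--     if not lines:
--         return (1, "")
--
--     # Normalize query once for better performance
--     query_lower = query_text.lower()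
--     query_words = set(query_lower.split())
--
--     # Pre-compute lowercased lines for efficiency
--     lines_lower = [line.lower() for line in lines]
--
--     best_line_num = 1
--     best_score = 0
--     best_line_text = lines[0] if lines else ""
--
--     for i, (line, line_lower) in enumerate(zip(lines, lines_lower), start=1):
--         if not line.strip():
--             continue
--
--         # Check for exact phrase match first (most important)
--         if query_lower in line_lower:
--             return (i, line.strip())
--
--         # Calculate word overlap score
--         line_words = set(line_lower.split())
--         overlap = len(query_words & line_words)
--
--         if overlap > best_score:
--             best_score = overlap
--             best_line_num = i
--             best_line_text = line.strip()
--
--     # Return best match found, or first non-empty line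
--     if best_score > 0:
--         return (best_line_num, best_line_text)
--
--     # Fallback: return first non-empty line
--     for i, line in enumerate(lines, start=1):
--         if line.strip():
--             return (i, line.strip())
--
--     return (1, best_line_text)
-- ===== SOURCE B (Python) =====
-- def _find_best_matching_line(text, query_text):
--     lines = text.split('\n')
--     query_lower = query_text.lower()
--
--     # Pass 1: first non-empty line containing the query as a phrase.
--     for i, line in enumerate(lines, start=1):
--         if line.strip() and query_lower in line.lower():
--             return (i, line.strip())
--
--     # Pass 2: first non-empty line with strictly greatest positive word overlap.
--     query_words = set(query_lower.split())
--     best = None  # (line_number, score, stripped_text)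
--     for i, line in enumerate(lines, start=1):
--         if not line.strip():
--             continue
--         overlap = len(query_words & set(line.lower().split()))
--         if overlap > 0 and (best is None or overlap > best[1]):
--             best = (i, overlap, line.strip())
--     if best is not None:
--         return (best[0], best[2])
--
--     # Pass 3: first non-empty line, else the first line.
--     for i, line in enumerate(lines, start=1):
--         if line.strip():
--             return (i, line.strip())
--     return (1, lines[0])
-- ===== Notes on version B (the rewrite author's own statement) =====
-- stated objective: simpler
-- what changed: A's single interleaved loop (running best variables, early return, plus a separate fallback scan sharing leftover state) is replaced by three independent sequential passes: first phrase match, then an Option-tracked best word overlap, then first non-empty line.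
import Mathlib
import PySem

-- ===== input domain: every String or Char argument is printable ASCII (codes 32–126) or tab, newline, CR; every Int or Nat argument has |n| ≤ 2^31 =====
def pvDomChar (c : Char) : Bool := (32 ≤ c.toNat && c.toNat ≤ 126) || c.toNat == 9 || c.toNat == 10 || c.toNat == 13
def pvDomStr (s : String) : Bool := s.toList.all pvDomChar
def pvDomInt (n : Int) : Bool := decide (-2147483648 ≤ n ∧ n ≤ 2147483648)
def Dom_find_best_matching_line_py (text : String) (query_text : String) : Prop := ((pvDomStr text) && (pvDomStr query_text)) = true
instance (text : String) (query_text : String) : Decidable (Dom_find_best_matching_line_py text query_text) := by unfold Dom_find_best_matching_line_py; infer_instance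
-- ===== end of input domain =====

-- B replaces A's single interleaved loop (running best + early return + shared fallback scan)
-- with three independent sequential passes (phrase match, then Option-tracked best overlap,
-- then first non-empty line); objective: simpler decomposition, same O(n·m) cost.

-- shared helpers: enumerate(·, start=i) and the common expression len(query_words & set(line_lower.split()))
def pvEnumFrom {α : Type} (i : Int) : List α → List (Int × α)
  | [] => []
  | x :: xs => (i, x) :: pvEnumFrom (i + 1) xs

def pvOverlap (qw : List String) (lineLower : String) : Int :=
  (((PySem.Set.ofList (PySem.Str.split₀ lineLower)).countP (fun w => qw.contains w) : Nat) : Int)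

-- ===== PORT A =====
-- the loop over enumerate(zip(lines, lines_lower), start=1); .inl = early return, .inr = final state
def pvALoop (ql : String) (qw : List String) :
    List (Int × String × String) → Int → Int → String → Sum (Int × String) (Int × Int × String)
  | [], bn, bs, bt => .inr (bn, bs, bt)
  | (i, line, lineLower) :: rest, bn, bs, bt =>
    if PySem.Str.strip line == "" then pvALoop ql qw rest bn bs bt
    else if PySem.Str.isIn ql lineLower then .inl (i, PySem.Str.strip line)
    else
      let overlap := pvOverlap qw lineLower
      if bs < overlap then pvALoop ql qw rest i overlap (PySem.Str.strip line)
      else pvALoop ql qw rest bn bs bt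

-- the final fallback loop: first non-empty line, else (1, best_line_text)
def pvAFallback : List (Int × String) → String → Int × String
  | [], bt => (1, bt)
  | (i, line) :: rest, bt =>
    if PySem.Str.strip line == "" then pvAFallback rest bt else (i, PySem.Str.strip line)

def find_best_matching_line_py (text : String) (query_text : String) : Int × String :=
  let lines := (PySem.Str.split? text "\n").getD []   -- '\n' ≠ "": split? is always some
  if lines == [] then (1, "")
  else
    let ql := PySem.Str.lower query_text
    let qw := PySem.Set.ofList (PySem.Str.split₀ ql)
    let bt := lines.headD ""                           -- lines[0] if lines else ""
    match pvALoop ql qw (pvEnumFrom 1 (lines.zip (lines.map PySem.Str.lower))) 1 0 bt with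
    | .inl r => r
    | .inr (bn, bs, bt') =>
      if 0 < bs then (bn, bt')
      else pvAFallback (pvEnumFrom 1 lines) bt'

-- ===== PORT B =====
-- pass 1: first non-empty line containing the query phrase
def pvBPass1 (ql : String) : List (Int × String) → Option (Int × String)
  | [] => none
  | (i, line) :: rest =>
    if !(PySem.Str.strip line == "") && PySem.Str.isIn ql (PySem.Str.lower line) then
      some (i, PySem.Str.strip line)
    else pvBPass1 ql rest

-- pass 2: first non-empty line with strictly greatest positive word overlap
def pvBPass2 (qw : List String) : List (Int × String) → Option (Int × Int × String) → Option (Int × Int × String)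
  | [], best => best
  | (i, line) :: rest, best =>
    if PySem.Str.strip line == "" then pvBPass2 qw rest best
    else
      let overlap := pvOverlap qw (PySem.Str.lower line)
      if 0 < overlap && (match best with | none => true | some (_, s, _) => s < overlap) then
        pvBPass2 qw rest (some (i, overlap, PySem.Str.strip line))
      else pvBPass2 qw rest best

-- pass 3: first non-empty line
def pvBPass3 : List (Int × String) → Option (Int × String)
  | [] => none
  | (i, line) :: rest =>
    if PySem.Str.strip line == "" then pvBPass3 rest else some (i, PySem.Str.strip line)

def find_best_matching_line_py_alt (text : String) (query_text : String) : Int × String :=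
  let lines := (PySem.Str.split? text "\n").getD []
  let ql := PySem.Str.lower query_text
  match pvBPass1 ql (pvEnumFrom 1 lines) with
  | some r => r
  | none =>
    let qw := PySem.Set.ofList (PySem.Str.split₀ ql)
    match pvBPass2 qw (pvEnumFrom 1 lines) none with
    | some (i, _, t) => (i, t)
    | none =>
      match pvBPass3 (pvEnumFrom 1 lines) with
      | some r => r
      | none => (1, lines.headD "")                    -- lines[0]; lines is never empty

-- ===== PRECONDITION & SPEC =====
def Spec_find_best_matching_line_py (text : String) (query_text : String) (out : Int × String) : Prop := out = find_best_matching_line_py_alt text query_text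
instance (text : String) (query_text : String) (out : Int × String) : Decidable (Spec_find_best_matching_line_py text query_text out) := by unfold Spec_find_best_matching_line_py; infer_instance

-- ===== CLAIM (what is proved, stated in full; the proofs are below) =====
def Claim_equal_find_best_matching_line_py : Prop := ∀ (text : String) (query_text : String), Dom_find_best_matching_line_py text query_text → Spec_find_best_matching_line_py text query_text (find_best_matching_line_py text query_text)

-- ===== LEMMAS AND PROOFS =====

-- invariant tying B's Option accumulator to A's three running variables
def pvRel : Option (Int × Int × String) → Int → Int → String → Prop
  | none, _, bs, _ => bs = 0
  | some (i, s, t), bn, bs, bt => i = bn ∧ s = bs ∧ t = bt ∧ 0 < s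

-- if pass 1 finds a phrase match, A's loop early-returns exactly it
theorem pvALoop_of_pass1_some (ql : String) (qw : List String) (l : List String) (i0 : Int)
    (r : Int × String) (h : pvBPass1 ql (pvEnumFrom i0 l) = some r) :
    ∀ bn bs bt, pvALoop ql qw (pvEnumFrom i0 (l.zip (l.map PySem.Str.lower))) bn bs bt = .inl r := by
  induction l generalizing i0 with
  | nil => exact absurd h (by simp [pvEnumFrom, pvBPass1])
  | cons x xs ih =>
    intro bn bs bt
    simp only [List.map_cons, List.zip_cons_cons, pvEnumFrom, pvBPass1, pvALoop] at h ⊢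
    cases hs : (PySem.Str.strip x == "") with
    | true =>
      simp only [hs, Bool.not_true, Bool.false_and, Bool.false_eq_true, reduceIte] at h ⊢
      exact ih (i0 + 1) h bn bs bt
    | false =>
      cases hin : PySem.Str.isIn ql (PySem.Str.lower x) with
      | true =>
        simp only [hs, hin, Bool.not_false, Bool.true_and, Bool.false_eq_true, reduceIte,
          Option.some.injEq] at h ⊢
        exact h ▸ rfl
      | false =>
        simp only [hs, hin, Bool.not_false, Bool.true_and, Bool.false_eq_true, reduceIte] at h ⊢
        split <;> exact ih (i0 + 1) h _ _ _

-- if pass 1 finds nothing, A's loop runs to the end and its state matches pass 2's accumulator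
theorem pvALoop_of_pass1_none (ql : String) (qw : List String) (l : List String) (i0 : Int)
    (h : pvBPass1 ql (pvEnumFrom i0 l) = none) :
    ∀ best bn bs bt, pvRel best bn bs bt →
      ∃ bn' bs' bt',
        pvALoop ql qw (pvEnumFrom i0 (l.zip (l.map PySem.Str.lower))) bn bs bt = .inr (bn', bs', bt') ∧
        pvRel (pvBPass2 qw (pvEnumFrom i0 l) best) bn' bs' bt' ∧ bs ≤ bs' ∧
        (pvBPass2 qw (pvEnumFrom i0 l) best = none → bn' = bn ∧ bs' = bs ∧ bt' = bt) := by
  induction l generalizing i0 with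
  | nil =>
    intro best bn bs bt hrel
    exact ⟨bn, bs, bt, rfl, hrel, le_refl _, fun _ => ⟨rfl, rfl, rfl⟩⟩
  | cons x xs ih =>
    intro best bn bs bt hrel
    simp only [List.map_cons, List.zip_cons_cons, pvEnumFrom, pvBPass1, pvBPass2, pvALoop] at h ⊢
    cases hs : (PySem.Str.strip x == "") with
    | true =>
      simp only [hs, Bool.not_true, Bool.false_and, Bool.false_eq_true, reduceIte] at h ⊢
      exact ih (i0 + 1) h best bn bs bt hrel
    | false =>
      cases hin : PySem.Str.isIn ql (PySem.Str.lower x) with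
      | true =>
        simp only [hs, hin, Bool.not_false, Bool.true_and, reduceIte] at h
        exact absurd h (by simp)
      | false =>
        simp only [hs, hin, Bool.not_false, Bool.true_and, Bool.false_eq_true, reduceIte] at h ⊢
        set ov := pvOverlap qw (PySem.Str.lower x) with hov
        cases best with
        | none =>
          simp only [pvRel] at hrel
          subst hrel
          by_cases hup : (0 : Int) < ov
          · rw [if_pos hup, if_pos (by simp only [decide_eq_true hup, Bool.true_and])]
            obtain ⟨bn', bs', bt', ha, hr, hle, _⟩ :=
              ih (i0 + 1) h (some (i0, ov, PySem.Str.strip x)) i0 ov (PySem.Str.strip x)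
                ⟨rfl, rfl, rfl, hup⟩
            refine ⟨bn', bs', bt', ha, hr, by omega, fun hnone => ?_⟩
            rw [hnone] at hr
            simp only [pvRel] at hr
            omega
          · rw [if_neg hup, if_neg (by simp only [decide_eq_false hup, Bool.false_and]; simp)]
            exact ih (i0 + 1) h none bn 0 bt rfl
        | some b =>
          obtain ⟨i, s, t⟩ := b
          obtain ⟨e1, e2, e3, hpos⟩ := hrel
          by_cases hup : bs < ov
          · have hsov : s < ov := e2 ▸ hup
            have h0 : (0 : Int) < ov := lt_trans (e2 ▸ hpos) hup
            rw [if_pos hup, if_pos (by simp only [decide_eq_true h0, decide_eq_true hsov,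
              Bool.and_self])]
            obtain ⟨bn', bs', bt', ha, hr, hle, _⟩ :=
              ih (i0 + 1) h (some (i0, ov, PySem.Str.strip x)) i0 ov (PySem.Str.strip x)
                ⟨rfl, rfl, rfl, h0⟩
            refine ⟨bn', bs', bt', ha, hr, by omega, fun hnone => ?_⟩
            rw [hnone] at hr
            simp only [pvRel] at hr
            omega
          · have hsov : ¬ s < ov := e2 ▸ hup
            rw [if_neg hup, if_neg (by simp only [decide_eq_false hsov, Bool.and_false]; simp)]
            exact ih (i0 + 1) h (some (i, s, t)) bn bs bt ⟨e1, e2, e3, hpos⟩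

-- A's fallback loop is pass 3 with default (1, bt)
theorem pvAFallback_eq_pass3 (l : List (Int × String)) (bt : String) :
    pvAFallback l bt = match pvBPass3 l with | some r => r | none => (1, bt) := by
  induction l with
  | nil => rfl
  | cons x xs ih =>
    obtain ⟨i, line⟩ := x
    simp only [pvAFallback, pvBPass3]
    split <;> simp [ih]

-- ===== VERDICT (by name: the statement is the Claim_ definition above) =====
theorem find_best_matching_line_py_spec : Claim_equal_find_best_matching_line_py := by
  intro text query_text _
  unfold Spec_find_best_matching_line_py find_best_matching_line_py find_best_matching_line_py_alt
  set lines := (PySem.Str.split? text "\n").getD [] with hlines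
  set ql := PySem.Str.lower query_text
  set qw := PySem.Set.ofList (PySem.Str.split₀ ql)
  by_cases hnil : lines == []
  · -- unreachable for real splits, but both sides return (1, "")
    simp at hnil
    simp [hnil, pvEnumFrom, pvBPass1, pvBPass2, pvBPass3]
  · simp only [hnil, if_false, Bool.false_eq_true]
    cases h1 : pvBPass1 ql (pvEnumFrom 1 lines) with
    | some r =>
      rw [pvALoop_of_pass1_some ql qw lines 1 r h1]
    | none =>
      obtain ⟨bn', bs', bt', ha, hr, hle, hun⟩ :=
        pvALoop_of_pass1_none ql qw lines 1 h1 none 1 0 (lines.headD "") rfl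
      rw [ha]
      cases h2 : pvBPass2 qw (pvEnumFrom 1 lines) none with
      | none =>
        rw [h2] at hr hun
        obtain ⟨e1, e2, e3⟩ := hun rfl
        simp only [pvRel] at hr
        simp only [e1, e2, e3]
        simp [pvAFallback_eq_pass3]
      | some b =>
        obtain ⟨i, s, t⟩ := b
        rw [h2] at hr
        obtain ⟨e1, e2, e3, hpos⟩ := hr
        simp [← e1, ← e2, ← e3, hpos]
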